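-- pv_equiv track=rewrite | github.com/Samuelmagilocusts/Advent-of-Code-2024 | Day 2/part 2.py | trace_array_journey
-- ===== SOURCE A (Python) =====
-- def trace_array_journey(array, last_result = '', result = 0, path = []):
--     if len(array) <= 1:
--         return result, path
--     value1 = array[0]
--     value2 = array[1]
--     if value1 < value2:
--         if last_result == 'a':
--             return trace_array_journey(array[1:], 'a', result, path + ['a'])
--         elif last_result == '':
--             return trace_array_journey(array[1:], 'a', result, path + ['a'])
--         else:
--             return trace_array_journey(array[1:], 'a', result+1, path + ['a'])
--     elif value1 > value2:
--         if last_result == 'd':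
--             return trace_array_journey(array[1:], 'd', result, path + ['d'])
--         elif last_result == '':
--             return trace_array_journey(array[1:], 'd', result, path + ['d'])
--         else:
--             return trace_array_journey(array[1:], 'd', result+1, path + ['d'])
--     elif value1 == value2:
--         if last_result == 's':
--             return trace_array_journey(array[1:], 's', result, path + ['s'])
--         elif last_result == '':
--             return trace_array_journey(array[1:], 's', result, path + ['s'])
--         else:
--             return trace_array_journey(array[1:], 's', result+1, path + ['s'])
-- ===== SOURCE B (Python) =====
-- def trace_array_journey(array, last_result = '', result = 0, path = []):
--     prev = last_result
--     out = list(path)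
--     for i in range(len(array) - 1):
--         d = 'a' if array[i] < array[i + 1] else ('d' if array[i] > array[i + 1] else 's')
--         if prev != '' and prev != d:
--             result += 1
--         out.append(d)
--         prev = d
--     return result, out
-- ===== Notes on version B (the rewrite author's own statement) =====
-- stated objective: faster
-- what changed: Replaced the O(n^2) recursion (which copies array[1:] and path+[d] at every step) by a single iterative index pass that tracks the previous direction and appends to one output list.
import Mathlib
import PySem

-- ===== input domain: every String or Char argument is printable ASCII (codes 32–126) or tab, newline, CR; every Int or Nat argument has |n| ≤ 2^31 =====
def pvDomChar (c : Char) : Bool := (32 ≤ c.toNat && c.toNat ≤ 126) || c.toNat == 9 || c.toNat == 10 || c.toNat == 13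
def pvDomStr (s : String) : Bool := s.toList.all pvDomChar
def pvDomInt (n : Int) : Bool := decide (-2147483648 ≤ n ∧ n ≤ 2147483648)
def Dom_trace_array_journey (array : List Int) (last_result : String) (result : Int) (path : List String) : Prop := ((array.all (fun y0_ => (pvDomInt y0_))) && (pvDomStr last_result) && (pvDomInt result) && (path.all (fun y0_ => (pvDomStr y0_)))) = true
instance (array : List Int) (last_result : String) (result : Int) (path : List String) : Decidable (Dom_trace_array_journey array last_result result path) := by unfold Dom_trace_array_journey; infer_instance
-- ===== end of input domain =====

-- ===== PORT A =====
-- B replaces A's O(n^2) recursion by one iterative pass; equivalence of the return values proved below.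
def trace_array_journey (array : List Int) (last_result : String) (result : Int) (path : List String) : Int × List String :=
  match array with
  | [] => (result, path)
  | [_] => (result, path)
  | value1 :: value2 :: rest =>
    if value1 < value2 then
      if last_result == "a" then trace_array_journey (value2 :: rest) "a" result (path ++ ["a"])
      else if last_result == "" then trace_array_journey (value2 :: rest) "a" result (path ++ ["a"])
      else trace_array_journey (value2 :: rest) "a" (result + 1) (path ++ ["a"])
    else if value1 > value2 then
      if last_result == "d" then trace_array_journey (value2 :: rest) "d" result (path ++ ["d"])
      else if last_result == "" then trace_array_journey (value2 :: rest) "d" result (path ++ ["d"])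
      else trace_array_journey (value2 :: rest) "d" (result + 1) (path ++ ["d"])
    else
      if last_result == "s" then trace_array_journey (value2 :: rest) "s" result (path ++ ["s"])
      else if last_result == "" then trace_array_journey (value2 :: rest) "s" result (path ++ ["s"])
      else trace_array_journey (value2 :: rest) "s" (result + 1) (path ++ ["s"])

-- ===== PORT B =====
def pvStepDir (a b : Int) : String := if a < b then "a" else if a > b then "d" else "s"

def pvStep (st : String × Int × List String) (p : Int × Int) : String × Int × List String :=
  let d := pvStepDir p.1 p.2
  (d, (if st.1 ≠ "" ∧ st.1 ≠ d then st.2.1 + 1 else st.2.1), st.2.2 ++ [d])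

def trace_array_journey_alt (array : List Int) (last_result : String) (result : Int) (path : List String) : Int × List String :=
  let st := (array.zip (array.drop 1)).foldl pvStep (last_result, result, path)
  (st.2.1, st.2.2)

-- ===== PRECONDITION & SPEC =====
def Spec_trace_array_journey (array : List Int) (last_result : String) (result : Int) (path : List String) (out : Int × List String) : Prop := out = trace_array_journey_alt array last_result result path
instance (array : List Int) (last_result : String) (result : Int) (path : List String) (out : Int × List String) : Decidable (Spec_trace_array_journey array last_result result path out) := by unfold Spec_trace_array_journey; infer_instance

-- ===== CLAIM (what is proved, stated in full; the proofs are below) =====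
def Claim_equal_trace_array_journey : Prop := ∀ (array : List Int) (last_result : String) (result : Int) (path : List String), Dom_trace_array_journey array last_result result path → Spec_trace_array_journey array last_result result path (trace_array_journey array last_result result path)

-- ===== LEMMAS AND PROOFS =====
theorem alt_cons (v1 v2 : Int) (rest : List Int) (l : String) (r : Int) (p : List String) :
    trace_array_journey_alt (v1 :: v2 :: rest) l r p =
      trace_array_journey_alt (v2 :: rest) (pvStepDir v1 v2)
        (if l ≠ "" ∧ l ≠ pvStepDir v1 v2 then r + 1 else r) (p ++ [pvStepDir v1 v2]) := by
  simp [trace_array_journey_alt, List.zip, pvStep]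

theorem trace_eq_alt : ∀ (array : List Int) (l : String) (r : Int) (p : List String),
    trace_array_journey array l r p = trace_array_journey_alt array l r p := by
  intro array
  induction array with
  | nil => intro l r p; simp [trace_array_journey, trace_array_journey_alt]
  | cons v1 t ih =>
    cases t with
    | nil => intro l r p; simp [trace_array_journey, trace_array_journey_alt]
    | cons v2 rest =>
      intro l r p
      rw [alt_cons]
      simp only [trace_array_journey, pvStepDir]
      split_ifs with h1 h2 <;>
        simp_all [ih, beq_iff_eq] <;>
        · rcases eq_or_ne l "" with h | h <;> simp_all

-- ===== VERDICT (by name: the statement is the Claim_ definition above) =====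
theorem trace_array_journey_spec : Claim_equal_trace_array_journey := by
  intro array l r p _
  unfold Spec_trace_array_journey
  exact trace_eq_alt array l r p
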